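-- pv_equiv track=rewrite | github.com/Lv296TAQC/python_tasks | tasks/task_559.py | number_of_mercenn
-- ===== SOURCE A (Python) =====
-- def is_prime_number(check_number):
--     """
--     Ğ¡heck whether the number is simple
--
--     Args:
--         check_number(int):any natural number
--
--     Return:
--         boolean value
--     """
--     for i in range(2, check_number):
--         if (check_number % i) == 0:
--             return False
--     return True
--
-- def return_prime_number(limit_number):
--     """
--     Output a simple number found by the function is_prime_number
--
--     Args:
--         limit_number(int): any natural number
--
--     Return:
--         list, which returns prime numbers
--     """
--     list_of_number = []
--     for counter_number in range(2, limit_number):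
--         if is_prime_number(counter_number):
--             list_of_number.append(counter_number)
--     return list_of_number
--
-- def number_of_mercenn(limit_number):
--     """
--     Find all smaller numbers of Mersenne.
--
--     Args:
--         limit_number(int): any natural number
--
--     Return:
--         list, which return prime number of Mercenns
--     """
--     list_of_mercenne_number = []
--     for p_number in return_prime_number(limit_number):
--         formula_of_number_marcenne = 2 ** p_number - 1
--         if formula_of_number_marcenne < limit_number:
--             list_of_mercenne_number.append(formula_of_number_marcenne)
--         else:
--             break
--     return list_of_mercenne_number
-- ===== SOURCE B (Python) =====
-- def number_of_mercenn(limit_number):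
--     """Single upward scan over exponents p, stopping as soon as 2**p - 1
--     reaches the limit, instead of first generating all primes below limit."""
--     mersennes = []
--     p = 2
--     while 2 ** p - 1 < limit_number:
--         if all(p % d != 0 for d in range(2, p)):
--             mersennes.append(2 ** p - 1)
--         p += 1
--     return mersennes
-- ===== Notes on version B (the rewrite author's own statement) =====
-- stated objective: faster
-- what changed: Instead of building the full list of primes below limit (trial division on every number up to limit) and then breaking, B iterates the exponent p upward and stops as soon as 2**p-1 >= limit, so only O(log limit) candidates are ever tested.
import Mathlib
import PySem

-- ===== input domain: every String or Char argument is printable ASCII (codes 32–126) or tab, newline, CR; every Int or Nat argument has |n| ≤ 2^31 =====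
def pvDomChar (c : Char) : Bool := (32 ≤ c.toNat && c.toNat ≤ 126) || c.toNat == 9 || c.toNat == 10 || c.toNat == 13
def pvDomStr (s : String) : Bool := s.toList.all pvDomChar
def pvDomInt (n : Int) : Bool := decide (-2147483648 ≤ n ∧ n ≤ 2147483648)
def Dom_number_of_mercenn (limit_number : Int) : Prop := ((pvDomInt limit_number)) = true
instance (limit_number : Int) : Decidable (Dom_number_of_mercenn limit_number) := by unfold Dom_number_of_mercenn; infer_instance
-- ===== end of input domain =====

-- B replaces A's "generate every prime below limit, then break" by a single upward
-- scan of the exponent p that stops as soon as 2^p - 1 reaches the limit (faster).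

-- ===== PORT A =====
-- trial division over range(2, n); List.all returns False at the first divisor,
-- exactly like the early `return False`
def is_prime_number (check_number : Int) : Bool :=
  (PySem.List.pyRange 2 check_number 1).all
    (fun i => !(PySem.Int.mod check_number i == 0))

def return_prime_number (limit_number : Int) : List Int :=
  (PySem.List.pyRange 2 limit_number 1).foldl
    (fun acc c => if is_prime_number c then acc ++ [c] else acc) []

-- the for-loop with `break`, as structural recursion over the prime list
def mercLoop (limit_number : Int) : List Int → List Int → List Int
  | acc, [] => acc
  | acc, p :: rest =>
    let m : Int := 2 ^ p.toNat - 1   -- 2 ** p; p comes from range(2, limit) so p ≥ 2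
    if m < limit_number then mercLoop limit_number (acc ++ [m]) rest else acc

def number_of_mercenn (limit_number : Int) : List Int :=
  mercLoop limit_number [] (return_prime_number limit_number)

-- ===== PORT B =====
-- the while-loop of Source B; terminates because p ≤ 2^p - 1 < limit forces p < limit.toNat
def mercScan (limit_number : Int) (p : Nat) (acc : List Int) : List Int :=
  if h : (2 : Int) ^ p - 1 < limit_number then
    mercScan limit_number (p + 1)
      (if (PySem.List.pyRange 2 (p : Int) 1).all
            (fun d => !(PySem.Int.mod (p : Int) d == 0))
       then acc ++ [(2 : Int) ^ p - 1] else acc)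
  else acc
termination_by limit_number.toNat - p
decreasing_by
  have hp : (p : Int) ≤ 2 ^ p - 1 := by
    have := Nat.lt_two_pow_self (n := p)
    have : (p : Int) < 2 ^ p := by exact_mod_cast this
    omega
  have : (p : Int) < limit_number := lt_of_le_of_lt hp h
  omega

def number_of_mercenn_alt (limit_number : Int) : List Int :=
  mercScan limit_number 2 []

-- ===== PRECONDITION & SPEC =====
def Spec_number_of_mercenn (limit_number : Int) (out : List Int) : Prop := out = number_of_mercenn_alt limit_number
instance (limit_number : Int) (out : List Int) : Decidable (Spec_number_of_mercenn limit_number out) := by unfold Spec_number_of_mercenn; infer_instance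

-- ===== CLAIM (what is proved, stated in full; the proofs are below) =====
def Claim_equal_number_of_mercenn : Prop := ∀ (limit_number : Int), Dom_number_of_mercenn limit_number → Spec_number_of_mercenn limit_number (number_of_mercenn limit_number)

-- ===== LEMMAS AND PROOFS =====

-- the Mersenne value of a natural exponent
def mers (q : Nat) : Int := 2 ^ q - 1

lemma mers_mono {a b : Nat} (h : a ≤ b) : mers a ≤ mers b := by
  unfold mers
  have : (2:Int) ^ a ≤ 2 ^ b := pow_le_pow_right₀ (by norm_num) h
  omega

lemma self_le_mers (q : Nat) : (q : Int) ≤ mers q := by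
  have := Nat.lt_two_pow_self (n := q)
  have : (q : Int) < 2 ^ q := by exact_mod_cast this
  unfold mers; omega

-- primality test of A applied to a natural number
def primeChk (q : Nat) : Bool := is_prime_number (q : Int)

-- A's break-loop is takeWhile+map
lemma mercLoop_eq (limit : Int) (L : List Int) (acc : List Int) :
    mercLoop limit acc L =
      acc ++ (L.takeWhile (fun p => decide ((2:Int) ^ p.toNat - 1 < limit))).map
        (fun p => (2:Int) ^ p.toNat - 1) := by
  induction L generalizing acc with
  | nil => simp [mercLoop]
  | cons p rest ih =>
    simp only [mercLoop, List.takeWhile]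
    by_cases h : (2:Int) ^ p.toNat - 1 < limit
    · simp [h, ih]
    · simp [h]

-- on a strictly increasing list, takeWhile of a downward-closed predicate is filter
lemma takeWhile_eq_filter_of_mono {α : Type} [Preorder α] (pred : α → Bool)
    (hmono : ∀ a b : α, a ≤ b → pred b = true → pred a = true)
    (L : List α) (hs : L.Pairwise (· < ·)) :
    L.takeWhile pred = L.filter pred := by
  induction L with
  | nil => rfl
  | cons x xs ih =>
    rcases List.pairwise_cons.mp hs with ⟨hx, hxs⟩
    by_cases h : pred x = true
    · simp [List.takeWhile, List.filter, h, ih hxs]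
    · have : xs.filter pred = [] := by
        apply List.filter_eq_nil_iff.mpr
        intro y hy hpy
        exact h (hmono x y (le_of_lt (hx y hy)) hpy)
      simp [List.takeWhile, List.filter, h, this]

-- B's scan collects mers over primes in [p, N) for N = first failure point
lemma mercScan_eq (limit : Int) (M : Nat) :
    ∀ (p : Nat) (acc : List Int), M = limit.toNat + 2 - p →
    mercScan limit p acc =
      acc ++ ((((List.range' p M).takeWhile (fun q => decide (mers q < limit))).filter
               (fun q => primeChk q)).map mers) := by
  induction M with
  | zero =>
    intro p acc hM
    have hfail : ¬ ((2:Int) ^ p - 1 < limit) := by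
      have hp : limit.toNat + 2 ≤ p := by omega
      have h1 : (p : Int) ≤ mers p := self_le_mers p
      have h2 : limit ≤ (limit.toNat : Int) := Int.self_le_toNat limit
      unfold mers at h1
      have : (limit.toNat + 2 : Int) ≤ (p : Int) := by exact_mod_cast hp
      omega
    rw [mercScan]
    simp [hfail]
  | succ M ih =>
    intro p acc hM
    rw [mercScan, List.range'_succ]
    by_cases h : (2:Int) ^ p - 1 < limit
    · have hmers : mers p < limit := h
      simp only [h, dif_pos, List.takeWhile_cons, hmers, decide_true]
      rw [ih (p+1) _ (by omega)]
      by_cases hpr : primeChk p = true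
      · have : (PySem.List.pyRange 2 (p : Int) 1).all
            (fun d => !(PySem.Int.mod (p : Int) d == 0)) = true := hpr
        simp [this, hpr, mers]
      · have : ¬ ((PySem.List.pyRange 2 (p : Int) 1).all
            (fun d => !(PySem.Int.mod (p : Int) d == 0)) = true) := hpr
        simp [this, hpr, mers]
    · have hmers : ¬ (mers p < limit) := h
      simp [h, hmers]

-- two filtered ranges agree when the predicate forces membership below both bounds
lemma filter_range'_ext (cond : Nat → Bool) (t1 t2 : Nat)
    (h : ∀ q, cond q = true → q < 2 + t1 ∧ q < 2 + t2) :
    (List.range' 2 t1).filter cond = (List.range' 2 t2).filter cond := by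
  -- prove an auxiliary one-sided version then apply to both orders
  have aux : ∀ u v : Nat, u ≤ v → (∀ q, cond q = true → q < 2 + u) →
      (List.range' 2 v).filter cond = (List.range' 2 u).filter cond := by
    intro u v huv hq
    have hsplit : List.range' 2 v = List.range' 2 u ++ List.range' (2 + u) (v - u) := by
      have h1 := List.range'_append (s := 2) (m := u) (n := v - u) (step := 1)
      simp only [one_mul, Nat.add_sub_cancel' huv] at h1
      exact h1.symm
    rw [hsplit, List.filter_append]
    have : (List.range' (2 + u) (v - u)).filter cond = [] := by
      apply List.filter_eq_nil_iff.mpr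
      intro q hqmem hcq
      have := List.mem_range'_1.mp hqmem
      have := hq q hcq
      omega
    simp [this]
  rcases le_total t1 t2 with hle | hle
  · rw [aux t1 t2 hle (fun q hq => (h q hq).1)]
  · rw [aux t2 t1 hle (fun q hq => (h q hq).2)]

-- the common normal form both programs reduce to
lemma cond_bound (limit : Int) (q : Nat)
    (hc : (primeChk q && decide (mers q < limit)) = true) :
    (q : Int) < limit := by
  have h2 : mers q < limit := by
    have := (Bool.and_eq_true _ _).mp hc
    exact of_decide_eq_true this.2
  exact lt_of_le_of_lt (self_le_mers q) h2

-- A in normal form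
lemma portA_norm (limit : Int) :
    number_of_mercenn limit =
      (((List.range' 2 (limit - 2).toNat).filter
          (fun q => primeChk q && decide (mers q < limit))).map mers) := by
  unfold number_of_mercenn return_prime_number
  rw [PySem.List.foldl_append_if_eq_filter, mercLoop_eq]
  rw [PySem.List.pyRange_one]
  have hrange : List.range ((limit : Int) - 2).toNat =
      (List.range' 0 ((limit - 2).toNat)) := by simp [List.range_eq_range']
  rw [hrange]
  -- move everything to a Nat-level range' 2 list
  have hmap : (List.range' 0 ((limit - 2).toNat)).map (fun k : Nat => (2 : Int) + k) =
      (List.range' 2 ((limit - 2).toNat)).map (fun q : Nat => (q : Int)) := by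
    rw [List.range'_eq_map_range, List.range'_eq_map_range, List.map_map, List.map_map]
    apply List.map_congr_left
    intro k _
    simp
  rw [hmap, List.filter_map]
  simp only [List.nil_append]
  rw [List.takeWhile_map, List.map_map]
  have hchk : (is_prime_number ∘ fun q : Nat => (q : Int)) = primeChk := rfl
  rw [hchk]
  have htw : ((fun p : Int => decide ((2:Int) ^ p.toNat - 1 < limit)) ∘ fun q : Nat => (q : Int))
      = (fun q : Nat => decide (mers q < limit)) := by
    funext q; simp [mers]
  rw [htw]
  have hmm : ((fun p : Int => (2:Int) ^ p.toNat - 1) ∘ fun q : Nat => (q : Int)) = mers := by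
    funext q; simp [mers]
  rw [hmm]
  rw [takeWhile_eq_filter_of_mono _ ?mono _ ?sorted]
  case mono =>
    intro a b hab hb
    exact decide_eq_true (lt_of_le_of_lt (mers_mono hab) (of_decide_eq_true hb))
  case sorted =>
    exact (List.pairwise_lt_range' (s := 2) (n := (limit - 2).toNat) (step := 1)).sublist
      List.filter_sublist
  rw [List.filter_filter]
  simp only [Bool.and_comm]

-- B in normal form
lemma portB_norm (limit : Int) :
    number_of_mercenn_alt limit =
      (((List.range' 2 limit.toNat).filter
          (fun q => primeChk q && decide (mers q < limit))).map mers) := by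
  unfold number_of_mercenn_alt
  rw [mercScan_eq limit (limit.toNat + 2 - 2) 2 [] (by omega)]
  have : limit.toNat + 2 - 2 = limit.toNat := by omega
  rw [this]
  rw [takeWhile_eq_filter_of_mono _ ?mono _ ?sorted]
  case mono =>
    intro a b hab hb
    exact decide_eq_true (lt_of_le_of_lt (mers_mono hab) (of_decide_eq_true hb))
  case sorted => exact List.pairwise_lt_range' (s := 2) (n := limit.toNat) (step := 1)
  rw [List.filter_filter]
  simp

-- ===== VERDICT (by name: the statement is the Claim_ definition above) =====
theorem number_of_mercenn_spec : Claim_equal_number_of_mercenn := by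
  intro limit _
  unfold Spec_number_of_mercenn
  rw [portA_norm, portB_norm]
  congr 1
  apply filter_range'_ext
  intro q hc
  have h := cond_bound limit q hc
  constructor
  · omega
  · omega
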